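-- pv_equiv track=rewrite | github.com/olsenw/LeetCodeExercises | Python3/maximum_number_of_tasks_you_can_assign.py | maxTaskAssign_fails
-- ===== SOURCE A (Python) =====
-- from typing import List, Dict, Set, Optional
--
-- def maxTaskAssign_fails(tasks: List[int], workers: List[int], pills: int, strength: int) -> int:
--     answer = 0
--     m,n = len(workers), len(tasks)
--     workers.sort()
--     tasks.sort()
--     j = 0
--     for i in range(n):
--         if workers[j] >= tasks[i]:
--             answer += 1
--         elif pills and workers[j] + strength >= tasks[i]:
--             answer += 1
--             pills -= 1
--         j += 1
--         if j == m:
--             break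
--     return answer
-- ===== SOURCE B (Python) =====
-- def maxTaskAssign_fails(tasks, workers, pills, strength):
--     tasks.sort()
--     workers.sort()
--     deficits = sorted(t - w for w, t in zip(workers, tasks))
--
--     def upper_bound(limit):
--         # index of first deficit > limit in the sorted deficit list
--         lo, hi = 0, len(deficits)
--         while lo < hi:
--             mid = (lo + hi) // 2
--             if deficits[mid] <= limit:
--                 lo = mid + 1
--             else:
--                 hi = mid
--         return lo
--
--     free = upper_bound(0)
--     boosted = upper_bound(max(strength, 0)) - free
--     return free + min(pills, boosted)
-- ===== Notes on version B (the rewrite author's own statement) =====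
-- stated objective: alternative
-- what changed: Replaces A's stateful pairwise greedy loop (running pills counter, break, index threading) by a deficit transform: build the sorted list of deficits t-w of the paired sorted lists, locate the thresholds 0 and strength in it by hand-written binary search, and combine the two positions with free + min(pills, boosted).
-- outside the precondition, e.g. on maxTaskAssign_fails([5], [1], -1, 10): A returns 1, B returns -1; on maxTaskAssign_fails([3], [], 1, 0): A raises IndexError, B returns 0
import Mathlib
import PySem

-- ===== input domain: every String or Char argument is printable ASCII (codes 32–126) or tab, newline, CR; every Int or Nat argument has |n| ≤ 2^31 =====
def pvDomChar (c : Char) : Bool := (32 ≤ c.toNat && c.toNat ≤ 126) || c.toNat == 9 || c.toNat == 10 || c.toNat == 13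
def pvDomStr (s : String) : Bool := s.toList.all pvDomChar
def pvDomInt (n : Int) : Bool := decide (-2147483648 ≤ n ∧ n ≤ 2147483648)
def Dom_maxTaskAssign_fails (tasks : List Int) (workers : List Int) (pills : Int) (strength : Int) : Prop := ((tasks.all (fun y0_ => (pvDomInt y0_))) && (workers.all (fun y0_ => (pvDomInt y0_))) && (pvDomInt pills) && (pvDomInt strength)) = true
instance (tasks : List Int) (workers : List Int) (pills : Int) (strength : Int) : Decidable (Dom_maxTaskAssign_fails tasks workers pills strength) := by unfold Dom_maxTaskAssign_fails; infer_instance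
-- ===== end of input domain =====

-- B replaces A's stateful pairwise greedy loop by a sorted deficit list queried by binary search
-- (objective: alternative). Both A and B sort `tasks` and `workers` in place; the equivalence
-- proved here is about the return value.

-- ===== PORT A =====
-- A's for-loop over i in range(n) with running j, answer, pills; the break `j == m` and the
-- indexing workers[j] / tasks[i] are kept literally (pyGet? = none is Python's IndexError,
-- excluded by Pre_; the loop then stops with the current answer).
def maxTaskAssign_fails_go (ts ws : List Int) (m strength : Int) :
    Nat → Int → Int → Int → Int → Int
  | 0, _, _, answer, _ => answer
  | rem + 1, i, j, answer, pills =>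
    match PySem.List.pyGet? ws j, PySem.List.pyGet? ts i with
    | some wj, some ti =>
      let st :=
        if wj ≥ ti then (answer + 1, pills)
        else if pills ≠ 0 ∧ wj + strength ≥ ti then (answer + 1, pills - 1)
        else (answer, pills)
      if j + 1 = m then st.1
      else maxTaskAssign_fails_go ts ws m strength rem (i + 1) (j + 1) st.1 st.2
    | _, _ => answer

def maxTaskAssign_fails (tasks : List Int) (workers : List Int) (pills : Int) (strength : Int) : Int :=
  let answer : Int := 0
  let m : Int := workers.length
  let n : Nat := tasks.length
  let ws := PySem.List.sorted workers (fun x => x) false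
  let ts := PySem.List.sorted tasks (fun x => x) false
  maxTaskAssign_fails_go ts ws m strength n 0 0 answer pills

-- ===== PORT B =====
-- Source B's inner `upper_bound`: the while-loop over (lo, hi), transcribed with a fuel argument
-- (the caller passes len(deficits)+1, which exceeds the loop's iteration count hi - lo).
def maxTaskAssign_fails_ub (ds : List Int) (limit : Int) : Nat → Int → Int → Int
  | 0, lo, _ => lo
  | fuel + 1, lo, hi =>
    if lo < hi then
      let mid := PySem.Int.floordiv (lo + hi) 2
      match PySem.List.pyGet? ds mid with
      | some d =>
        if d ≤ limit then maxTaskAssign_fails_ub ds limit fuel (mid + 1) hi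
        else maxTaskAssign_fails_ub ds limit fuel lo mid
      | none => lo
    else lo

def maxTaskAssign_fails_alt (tasks : List Int) (workers : List Int) (pills : Int) (strength : Int) : Int :=
  let ws := PySem.List.sorted workers (fun x => x) false
  let ts := PySem.List.sorted tasks (fun x => x) false
  let deficits := PySem.List.sorted ((ws.zip ts).map (fun p => p.2 - p.1)) (fun x => x) false
  let ub := fun (limit : Int) =>
    maxTaskAssign_fails_ub deficits limit (deficits.length + 1) 0 (deficits.length : Int)
  let free := ub 0
  let boosted := ub (max strength 0) - free
  free + min pills boosted

-- ===== PRECONDITION & SPEC =====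
-- Pre_ restricts to the task's natural domain: a nonnegative pill count (for pills < 0 the
-- truthiness test `if pills` in A never turns the pills off, a branch outside the natural
-- domain that B's closed form has no reason to mirror), and excludes empty workers with
-- nonempty tasks, where A raises IndexError on workers[0].
def Pre_maxTaskAssign_fails (tasks : List Int) (workers : List Int) (pills : Int) (strength : Int) : Prop :=
  0 ≤ pills ∧ ¬(workers = [] ∧ tasks ≠ [])
instance (tasks : List Int) (workers : List Int) (pills : Int) (strength : Int) : Decidable (Pre_maxTaskAssign_fails tasks workers pills strength) := by unfold Pre_maxTaskAssign_fails; infer_instance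

def pvWitness_maxTaskAssign_fails : List Int × List Int × Int × Int := ([3, 1, 2], [0, 2, 5], 1, 2)

def Spec_maxTaskAssign_fails (tasks : List Int) (workers : List Int) (pills : Int) (strength : Int) (out : Int) : Prop := out = maxTaskAssign_fails_alt tasks workers pills strength
instance (tasks : List Int) (workers : List Int) (pills : Int) (strength : Int) (out : Int) : Decidable (Spec_maxTaskAssign_fails tasks workers pills strength out) := by unfold Spec_maxTaskAssign_fails; infer_instance

-- ===== CLAIM (what is proved, stated in full; the proofs are below) =====
def Claim_equal_maxTaskAssign_fails : Prop := ∀ (tasks : List Int) (workers : List Int) (pills : Int) (strength : Int), Dom_maxTaskAssign_fails tasks workers pills strength → Pre_maxTaskAssign_fails tasks workers pills strength → Spec_maxTaskAssign_fails tasks workers pills strength (maxTaskAssign_fails tasks workers pills strength)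

-- ===== LEMMAS AND PROOFS =====

-- Proof-side pair loop: A's loop rewritten over the zipped pair list.
def pvPairGo (strength : Int) : List (Int × Int) → Int → Int → Int
  | [], answer, _ => answer
  | (w, t) :: rest, answer, pills =>
    if w ≥ t then pvPairGo strength rest (answer + 1) pills
    else if pills ≠ 0 ∧ w + strength ≥ t then pvPairGo strength rest (answer + 1) (pills - 1)
    else pvPairGo strength rest answer pills

lemma pvPairGo_closed (strength : Int) :
    ∀ (ps : List (Int × Int)) (answer pills : Int), 0 ≤ pills →
    pvPairGo strength ps answer pills =
      answer + (ps.countP (fun p => decide (p.1 ≥ p.2)) : Int) +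
        min pills (ps.countP (fun p => decide (p.1 < p.2 ∧ p.1 + strength ≥ p.2)) : Int) := by
  intro ps
  induction ps with
  | nil =>
    intro answer pills hp
    simp only [pvPairGo, List.countP_nil]
    omega
  | cons p rest ih =>
    intro answer pills hp
    obtain ⟨w, t⟩ := p
    by_cases h1 : w ≥ t
    · have a1 : ((((w, t) :: rest).countP (fun p => decide (p.1 ≥ p.2)) : Nat) : Int)
          = (rest.countP (fun p => decide (p.1 ≥ p.2)) : Int) + 1 := by
        simp [h1]
      have a2 : ((((w, t) :: rest).countP (fun p => decide (p.1 < p.2 ∧ p.1 + strength ≥ p.2)) : Nat) : Int)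
          = (rest.countP (fun p => decide (p.1 < p.2 ∧ p.1 + strength ≥ p.2)) : Int) := by
        simp [not_lt.mpr h1]
      simp only [pvPairGo, if_pos h1]
      rw [ih (answer + 1) pills hp, a1, a2]
      omega
    · by_cases h2 : w + strength ≥ t
      · have a1 : ((((w, t) :: rest).countP (fun p => decide (p.1 ≥ p.2)) : Nat) : Int)
            = (rest.countP (fun p => decide (p.1 ≥ p.2)) : Int) := by
          simp [h1]
        have a2 : ((((w, t) :: rest).countP (fun p => decide (p.1 < p.2 ∧ p.1 + strength ≥ p.2)) : Nat) : Int)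
            = (rest.countP (fun p => decide (p.1 < p.2 ∧ p.1 + strength ≥ p.2)) : Int) + 1 := by
          simp [lt_of_not_ge h1, h2]
        by_cases h3 : pills = 0
        · subst h3
          have hnp : ¬ ((0:Int) ≠ 0 ∧ w + strength ≥ t) := by simp
          simp only [pvPairGo, if_neg h1, if_neg hnp]
          rw [ih answer 0 le_rfl, a1, a2]
          omega
        · simp only [pvPairGo, if_neg h1, if_pos (And.intro h3 h2)]
          rw [ih (answer + 1) (pills - 1) (by omega), a1, a2]
          omega
      · have a1 : ((((w, t) :: rest).countP (fun p => decide (p.1 ≥ p.2)) : Nat) : Int)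
            = (rest.countP (fun p => decide (p.1 ≥ p.2)) : Int) := by
          simp [h1]
        have a2 : ((((w, t) :: rest).countP (fun p => decide (p.1 < p.2 ∧ p.1 + strength ≥ p.2)) : Nat) : Int)
            = (rest.countP (fun p => decide (p.1 < p.2 ∧ p.1 + strength ≥ p.2)) : Int) := by
          simp [h2]
        have hnp : ¬ (pills ≠ 0 ∧ w + strength ≥ t) := by tauto
        simp only [pvPairGo, if_neg h1, if_neg hnp]
        rw [ih answer pills hp, a1, a2]

-- A's index-threaded loop equals the pair loop over the zipped suffixes.
lemma pv_go_eq_pairGo (WS TS : List Int) (strength : Int) :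
    ∀ (rem k : Nat) (answer pills : Int), rem + k = TS.length →
    maxTaskAssign_fails_go TS WS (WS.length : Int) strength rem (k : Int) (k : Int) answer pills
      = pvPairGo strength ((WS.drop k).zip (TS.drop k)) answer pills := by
  intro rem
  induction rem with
  | zero =>
    intro k answer pills hk
    have h : TS.drop k = [] := List.drop_eq_nil_of_le (by omega)
    simp [maxTaskAssign_fails_go, h, pvPairGo]
  | succ r ih =>
    intro k answer pills hk
    have hkT : k < TS.length := by omega
    by_cases hkW : k < WS.length
    · have hws : PySem.List.pyGet? WS (k : Int) = some WS[k] := by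
        rw [PySem.List.pyGet?_natCast]
        exact List.getElem?_eq_getElem hkW
      have hts : PySem.List.pyGet? TS (k : Int) = some TS[k] := by
        rw [PySem.List.pyGet?_natCast]
        exact List.getElem?_eq_getElem hkT
      have hdw : WS.drop k = WS[k] :: WS.drop (k + 1) := List.drop_eq_getElem_cons hkW
      have hdt : TS.drop k = TS[k] :: TS.drop (k + 1) := List.drop_eq_getElem_cons hkT
      simp only [maxTaskAssign_fails_go, hws, hts, hdw, hdt]
      rw [show ((k : Int) + 1) = ((k + 1 : Nat) : Int) by push_cast; ring]
      by_cases hbrk : ((k + 1 : Nat) : Int) = (WS.length : Int)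
      · have hW1 : k + 1 = WS.length := by exact_mod_cast hbrk
        have hdw1 : WS.drop (k + 1) = [] := List.drop_eq_nil_of_le (by omega)
        rw [if_pos hbrk]
        simp only [hdw1, List.zip_cons_cons, List.zip_nil_left, pvPairGo]
        by_cases h1 : WS[k] ≥ TS[k]
        · simp [h1]
        · by_cases h2 : pills ≠ 0 ∧ WS[k] + strength ≥ TS[k]
          · simp [h1, h2]
          · simp [h1, h2]
      · rw [if_neg hbrk]
        by_cases h1 : WS[k] ≥ TS[k]
        · simp only [List.zip_cons_cons, pvPairGo, if_pos h1]
          rw [ih (k + 1) (answer + 1) pills (by omega)]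
        · by_cases h2 : pills ≠ 0 ∧ WS[k] + strength ≥ TS[k]
          · simp only [List.zip_cons_cons, pvPairGo, if_neg h1, if_pos h2]
            rw [ih (k + 1) (answer + 1) (pills - 1) (by omega)]
          · simp only [List.zip_cons_cons, pvPairGo, if_neg h1, if_neg h2]
            rw [ih (k + 1) answer pills (by omega)]
    · have hws : PySem.List.pyGet? WS (k : Int) = none := by
        rw [PySem.List.pyGet?_natCast]
        exact List.getElem?_eq_none (by omega)
      have hdw : WS.drop k = [] := List.drop_eq_nil_of_le (by omega)
      simp [maxTaskAssign_fails_go, hws, hdw, pvPairGo]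

-- In a sorted list, the elements ≤ limit are exactly the first countP of them.
lemma pv_sorted_countP_char (ds : List Int) (limit : Int) (hs : ds.Pairwise (· ≤ ·)) :
    ∀ i (h : i < ds.length),
      (ds[i] ≤ limit ↔ i < ds.countP (fun d => decide (d ≤ limit))) := by
  induction ds with
  | nil => intro i h; simp at h
  | cons d rest ih =>
    have hd : ∀ x ∈ rest, d ≤ x := (List.pairwise_cons.mp hs).1
    have hrest := (List.pairwise_cons.mp hs).2
    intro i h
    have hcnt : (d :: rest).countP (fun d => decide (d ≤ limit))
        = (if d ≤ limit then 1 else 0) + rest.countP (fun d => decide (d ≤ limit)) := by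
      by_cases hdl : d ≤ limit
      · simp [List.countP_cons, hdl]; omega
      · simp [List.countP_cons, hdl]
    cases i with
    | zero =>
      simp only [List.getElem_cons_zero, hcnt]
      by_cases hdl : d ≤ limit
      · simp only [if_pos hdl]
        omega
      · have hz : rest.countP (fun d => decide (d ≤ limit)) = 0 := by
          rw [List.countP_eq_zero]
          intro x hx
          simp only [decide_eq_true_eq]
          have := hd x hx; omega
        simp [hdl, hz]
    | succ i =>
      have hi : i < rest.length := by simpa using h
      have := ih hrest i hi
      simp only [List.getElem_cons_succ, hcnt]
      by_cases hdl : d ≤ limit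
      · simp only [if_pos hdl]
        constructor
        · intro hx; omega
        · intro hx; exact this.mpr (by omega)
      · have hz : rest.countP (fun d => decide (d ≤ limit)) = 0 := by
          rw [List.countP_eq_zero]
          intro x hx
          simp only [decide_eq_true_eq]
          have := hd x hx; omega
        have hx : ¬ rest[i] ≤ limit := by
          intro hc
          have := this.mp hc; omega
        simp [hdl, hz, hx]

-- The binary search returns the count of elements ≤ limit (invariant lo ≤ count ≤ hi).
lemma pv_ub_eq (ds : List Int) (limit : Int) (hs : ds.Pairwise (· ≤ ·)) :
    ∀ (fuel : Nat) (lo hi : Int), 0 ≤ lo → hi ≤ (ds.length : Int) →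
      lo ≤ (ds.countP (fun d => decide (d ≤ limit)) : Int) →
      (ds.countP (fun d => decide (d ≤ limit)) : Int) ≤ hi →
      hi - lo < (fuel : Int) →
      maxTaskAssign_fails_ub ds limit fuel lo hi = (ds.countP (fun d => decide (d ≤ limit)) : Int) := by
  intro fuel
  induction fuel with
  | zero => intro lo hi h0 hlen hlc hch hf; simp at hf; omega
  | succ f ih =>
    intro lo hi h0 hlen hlc hch hf
    by_cases hlh : lo < hi
    · have hmid : PySem.Int.floordiv (lo + hi) 2 = (lo + hi) / 2 :=
        PySem.Int.floordiv_eq_ediv_of_pos (by omega)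
      have hml : lo ≤ (lo + hi) / 2 := by omega
      have hmh : (lo + hi) / 2 < hi := by omega
      set mid := (lo + hi) / 2 with hmiddef
      have hmn : mid = ((mid.toNat : Nat) : Int) := by omega
      have hmlt : mid.toNat < ds.length := by omega
      have hget : PySem.List.pyGet? ds mid = some ds[mid.toNat] := by
        conv_lhs => rw [hmn]
        rw [PySem.List.pyGet?_natCast]
        exact List.getElem?_eq_getElem hmlt
      have hchar := pv_sorted_countP_char ds limit hs mid.toNat hmlt
      simp only [maxTaskAssign_fails_ub, if_pos hlh, hmid, ← hmiddef, hget]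
      by_cases hdl : ds[mid.toNat] ≤ limit
      · have hcge : mid + 1 ≤ (ds.countP (fun d => decide (d ≤ limit)) : Int) := by
          have := hchar.mp hdl; omega
        rw [if_pos hdl]
        exact ih (mid + 1) hi (by omega) hlen hcge hch (by omega)
      · have hcle : (ds.countP (fun d => decide (d ≤ limit)) : Int) ≤ mid := by
          by_contra hc
          exact hdl (hchar.mpr (by omega))
        rw [if_neg hdl]
        exact ih lo mid (by omega) (by omega) hlc hcle (by omega)
    · simp only [maxTaskAssign_fails_ub, if_neg hlh]
      omega

-- Counting ≤ hiLim splits at loLim into the two bands (loLim ≤ hiLim).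
lemma pv_countP_split (loLim hiLim : Int) (h : loLim ≤ hiLim) :
    ∀ (l : List Int),
      l.countP (fun d => decide (d ≤ hiLim))
        = l.countP (fun d => decide (d ≤ loLim)) + l.countP (fun d => decide (loLim < d ∧ d ≤ hiLim)) := by
  intro l
  induction l with
  | nil => simp
  | cons d rest ih =>
    simp only [List.countP_cons, decide_eq_true_eq]
    rw [ih]
    split_ifs <;> omega

-- ===== VERDICT (by name: the statement is the Claim_ definition above) =====
theorem maxTaskAssign_fails_spec : Claim_equal_maxTaskAssign_fails := by
  intro tasks workers pills strength _ hpre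
  obtain ⟨hp, -⟩ := hpre
  unfold Spec_maxTaskAssign_fails maxTaskAssign_fails maxTaskAssign_fails_alt
  simp only []
  set WS := PySem.List.sorted workers (fun x => x) false with hWS
  set TS := PySem.List.sorted tasks (fun x => x) false with hTS
  set pairs := WS.zip TS with hpairs
  set defs0 := pairs.map (fun p => p.2 - p.1) with hdefs0
  set ds := PySem.List.sorted defs0 (fun x => x) false with hds
  -- A's side: loop = closed form over pairs
  have hlw : WS.length = workers.length := PySem.List.length_sorted workers (fun x => x) false
  have hlt : TS.length = tasks.length := PySem.List.length_sorted tasks (fun x => x) false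
  have hA : maxTaskAssign_fails_go TS WS (workers.length : Int) strength tasks.length 0 0 0 pills
      = (pairs.countP (fun p => decide (p.1 ≥ p.2)) : Int)
        + min pills (pairs.countP (fun p => decide (p.1 < p.2 ∧ p.1 + strength ≥ p.2)) : Int) := by
    have h0 := pv_go_eq_pairGo WS TS strength TS.length 0 0 pills (by omega)
    rw [show ((workers.length : Int)) = ((WS.length : Int)) by rw [hlw], ← hlt]
    simp only [Nat.cast_zero, List.drop_zero] at h0
    rw [h0, pvPairGo_closed strength _ 0 pills hp]
    ring
  rw [hA]
  -- B's side: the two binary searches are band counts on the deficit list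
  have hsorted : ds.Pairwise (· ≤ ·) := by
    have := PySem.List.sorted_pairwise defs0 (fun x => x) (κ := Int)
    simpa using this
  have hperm : ds.Perm defs0 := PySem.List.sorted_perm defs0 (fun x => x) false
  have hub : ∀ limit : Int,
      maxTaskAssign_fails_ub ds limit (ds.length + 1) 0 (ds.length : Int)
        = (ds.countP (fun d => decide (d ≤ limit)) : Int) := by
    intro limit
    have hcle : ds.countP (fun d => decide (d ≤ limit)) ≤ ds.length := List.countP_le_length
    exact pv_ub_eq ds limit hsorted (ds.length + 1) 0 (ds.length : Int)
      le_rfl le_rfl (by positivity) (by exact_mod_cast hcle) (by push_cast; omega)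
  have hcnt : ∀ limit : Int, ds.countP (fun d => decide (d ≤ limit))
      = defs0.countP (fun d => decide (d ≤ limit)) := fun limit => hperm.countP_eq _
  have hcnt2 : ds.countP (fun d => decide (d ≤ (0:Int)))
      = pairs.countP (fun p => decide (p.1 ≥ p.2)) := by
    rw [hcnt 0, hdefs0, List.countP_map]
    apply List.countP_congr
    intro p _
    simp only [Function.comp_apply, decide_eq_true_eq]
    omega
  have hsplit : (ds.countP (fun d => decide (d ≤ max strength 0)) : Int)
      = (ds.countP (fun d => decide (d ≤ (0:Int))) : Int)
        + (pairs.countP (fun p => decide (p.1 < p.2 ∧ p.1 + strength ≥ p.2)) : Int) := by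
    have hb : ds.countP (fun d => decide ((0:Int) < d ∧ d ≤ max strength 0))
        = pairs.countP (fun p => decide (p.1 < p.2 ∧ p.1 + strength ≥ p.2)) := by
      rw [hperm.countP_eq, hdefs0, List.countP_map]
      apply List.countP_congr
      intro p _
      simp only [Function.comp_apply, decide_eq_true_eq]
      omega
    rw [pv_countP_split 0 (max strength 0) (by omega) ds, hb]
    push_cast
    ring
  rw [hub 0, hub (max strength 0), hcnt2, hsplit, hcnt2]
  omega
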